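-- pv_equiv track=rewrite | github.com/trailofbits/skills | plugins/constant-time-analysis/ct_analyzer/filters.py | _normalize_reg
-- ===== SOURCE A (Python) =====
-- def _normalize_reg(operand: str) -> str:
--     """Normalize register name across width variants: rax/eax/ax/al -> rax."""
--     operand = operand.strip().lstrip("%")
--     # Handle x86 width suffixes; this is heuristic, not canonical
--     aliases = {
--         "rax": "rax", "eax": "rax", "ax": "rax", "al": "rax", "ah": "rax",
--         "rbx": "rbx", "ebx": "rbx", "bx": "rbx", "bl": "rbx", "bh": "rbx",
--         "rcx": "rcx", "ecx": "rcx", "cx": "rcx", "cl": "rcx", "ch": "rcx",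
--         "rdx": "rdx", "edx": "rdx", "dx": "rdx", "dl": "rdx", "dh": "rdx",
--         "rsi": "rsi", "esi": "rsi", "si": "rsi", "sil": "rsi",
--         "rdi": "rdi", "edi": "rdi", "di": "rdi", "dil": "rdi",
--         "rbp": "rbp", "ebp": "rbp", "bp": "rbp", "bpl": "rbp",
--         "rsp": "rsp", "esp": "rsp", "sp": "rsp", "spl": "rsp",
--     }
--     for n in range(8, 16):
--         for suffix in ("", "d", "w", "b"):
--             aliases[f"r{n}{suffix}"] = f"r{n}"
--     return aliases.get(operand, operand)
-- ===== SOURCE B (Python) =====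
-- def _normalize_reg(operand: str) -> str:
--     """Normalize register name across width variants: rax/eax/ax/al -> rax."""
--     op = operand.strip().lstrip("%")
--     n = len(op)
--     # a/b/c/d family: al ah ax / rax eax -> rax (and b, c, d likewise)
--     if n == 2 and op[0] in "abcd" and op[1] in "xlh":
--         return "r" + op[0] + "x"
--     if n == 3 and op[0] in "re" and op[1] in "abcd" and op[2] == "x":
--         return "r" + op[1] + "x"
--     # si/di/bp/sp family: sp, esp, rsp, spl -> rsp (and si, di, bp likewise)
--     if n == 2:
--         pair = op
--     elif n == 3 and op[0] in "re":
--         pair = op[1:]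
--     elif n == 3 and op[2] == "l":
--         pair = op[:2]
--     else:
--         pair = ""
--     if pair in ("si", "di", "bp", "sp"):
--         return "r" + pair
--     # r8-r15, optionally with a d/w/b width suffix
--     body = op[1:] if op[:1] == "r" else ""
--     if body[-1:] in ("d", "w", "b"):
--         body = body[:-1]
--     if body in ("8", "9", "10", "11", "12", "13", "14", "15"):
--         return "r" + body
--     return op
-- ===== Notes on version B (the rewrite author's own statement) =====
-- stated objective: alternative
-- what changed: B has no alias table at all: it decodes the register name structurally from its characters (a/b/c/d family by 2- or 3-char pattern, si/di/bp/sp family by extracting the 2-char base, r8-r15 by stripping an optional d/w/b width suffix from an 'r'+number body) and builds the canonical name with string concatenation, whereas A builds a 68-entry dict per call and looks the operand up.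
import Mathlib
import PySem

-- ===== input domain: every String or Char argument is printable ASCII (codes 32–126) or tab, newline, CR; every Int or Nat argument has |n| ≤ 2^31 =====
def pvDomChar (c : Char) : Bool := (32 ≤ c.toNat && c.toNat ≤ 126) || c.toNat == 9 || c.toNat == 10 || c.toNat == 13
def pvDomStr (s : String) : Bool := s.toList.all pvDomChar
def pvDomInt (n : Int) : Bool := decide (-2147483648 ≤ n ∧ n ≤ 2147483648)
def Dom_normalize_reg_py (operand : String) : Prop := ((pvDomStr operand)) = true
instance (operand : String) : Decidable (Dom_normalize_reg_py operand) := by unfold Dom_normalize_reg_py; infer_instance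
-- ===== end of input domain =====

-- B drops A's per-call 68-entry alias dict entirely and decodes the register name
-- structurally from its characters, building the canonical form by concatenation;
-- objective: alternative (table lookup vs on-demand pattern decoding).

-- ===== PORT A =====
-- the dict literal of irregular aliases (A's `aliases` before the loop)
def pvAliasesBase : PySem.Dict (List Char) (List Char) :=
  PySem.Dict.ofList [
    (['r', 'a', 'x'], ['r', 'a', 'x']),
    (['e', 'a', 'x'], ['r', 'a', 'x']),
    (['a', 'x'], ['r', 'a', 'x']),
    (['a', 'l'], ['r', 'a', 'x']),
    (['a', 'h'], ['r', 'a', 'x']),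
    (['r', 'b', 'x'], ['r', 'b', 'x']),
    (['e', 'b', 'x'], ['r', 'b', 'x']),
    (['b', 'x'], ['r', 'b', 'x']),
    (['b', 'l'], ['r', 'b', 'x']),
    (['b', 'h'], ['r', 'b', 'x']),
    (['r', 'c', 'x'], ['r', 'c', 'x']),
    (['e', 'c', 'x'], ['r', 'c', 'x']),
    (['c', 'x'], ['r', 'c', 'x']),
    (['c', 'l'], ['r', 'c', 'x']),
    (['c', 'h'], ['r', 'c', 'x']),
    (['r', 'd', 'x'], ['r', 'd', 'x']),
    (['e', 'd', 'x'], ['r', 'd', 'x']),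
    (['d', 'x'], ['r', 'd', 'x']),
    (['d', 'l'], ['r', 'd', 'x']),
    (['d', 'h'], ['r', 'd', 'x']),
    (['r', 's', 'i'], ['r', 's', 'i']),
    (['e', 's', 'i'], ['r', 's', 'i']),
    (['s', 'i'], ['r', 's', 'i']),
    (['s', 'i', 'l'], ['r', 's', 'i']),
    (['r', 'd', 'i'], ['r', 'd', 'i']),
    (['e', 'd', 'i'], ['r', 'd', 'i']),
    (['d', 'i'], ['r', 'd', 'i']),
    (['d', 'i', 'l'], ['r', 'd', 'i']),
    (['r', 'b', 'p'], ['r', 'b', 'p']),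
    (['e', 'b', 'p'], ['r', 'b', 'p']),
    (['b', 'p'], ['r', 'b', 'p']),
    (['b', 'p', 'l'], ['r', 'b', 'p']),
    (['r', 's', 'p'], ['r', 's', 'p']),
    (['e', 's', 'p'], ['r', 's', 'p']),
    (['s', 'p'], ['r', 's', 'p']),
    (['s', 'p', 'l'], ['r', 's', 'p'])
  ]

-- A's loop: for n in range(8, 16): for suffix in ("", "d", "w", "b"): aliases[f"r{n}{suffix}"] = f"r{n}"
def pvAliasesA : PySem.Dict (List Char) (List Char) :=
  (PySem.List.pyRange 8 16 1).foldl (fun d n =>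
    (["", "d", "w", "b"].map String.toList).foldl (fun d suf =>
      d.insert ('r' :: (PySem.Int.toChars n ++ suf)) ('r' :: PySem.Int.toChars n)) d)
    pvAliasesBase

-- A's tail: return aliases.get(operand, operand)
def pvARest (op : List Char) : String := String.ofList (pvAliasesA.getD op op)

def normalize_reg_py (operand : String) : String :=
  -- operand.strip().lstrip("%"): lstrip with the single char '%' is exactly dropWhile (· = '%')
  pvARest ((PySem.Chars.strip operand.toList).dropWhile (· = '%'))

-- ===== PORT B =====
-- B's tail after the common strip/lstrip: pure character-pattern decoding, no table.
-- pair: the 2-char base for the si/di/bp/sp family (Source B's `pair`)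
def pvPair (op : List Char) : List Char :=
  if (op.length : Int) = 2 then op
  else if (op.length : Int) = 3 ∧ PySem.List.pyGetD op 0 ' ' ∈ ['r', 'e'] then PySem.List.slice op (some 1) none
  else if (op.length : Int) = 3 ∧ PySem.List.pyGetD op 2 ' ' = 'l' then PySem.List.slice op none (some 2)
  else []

-- body: the candidate r8-r15 number with an optional d/w/b width suffix stripped (Source B's `body`)
def pvBody (op : List Char) : List Char :=
  let body0 : List Char := if PySem.List.slice op none (some 1) = ['r'] then PySem.List.slice op (some 1) none else []
  if PySem.List.slice body0 (some (-1)) none ∈ [['d'], ['w'], ['b']] then PySem.List.slice body0 none (some (-1)) else body0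

def pvBRest (op : List Char) : String :=
  -- a/b/c/d family: "xlh" 2-char forms and r_x/e_x 3-char forms -> "r_x"
  if (op.length : Int) = 2 ∧ PySem.List.pyGetD op 0 ' ' ∈ ['a', 'b', 'c', 'd'] ∧ PySem.List.pyGetD op 1 ' ' ∈ ['x', 'l', 'h'] then
    String.ofList ['r', PySem.List.pyGetD op 0 ' ', 'x']
  else if (op.length : Int) = 3 ∧ PySem.List.pyGetD op 0 ' ' ∈ ['r', 'e'] ∧ PySem.List.pyGetD op 1 ' ' ∈ ['a', 'b', 'c', 'd'] ∧ PySem.List.pyGetD op 2 ' ' = 'x' then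
    String.ofList ['r', PySem.List.pyGetD op 1 ' ', 'x']
  -- si/di/bp/sp family: 2-char base extracted from "__", "r__"/"e__" or "__l"
  else if pvPair op ∈ [['s', 'i'], ['d', 'i'], ['b', 'p'], ['s', 'p']] then
    String.ofList ('r' :: pvPair op)
  -- r8-r15, optionally with a d/w/b width suffix
  else if pvBody op ∈ [['8'], ['9'], ['1', '0'], ['1', '1'], ['1', '2'], ['1', '3'], ['1', '4'], ['1', '5']] then
    String.ofList ('r' :: pvBody op)
  else String.ofList op

def normalize_reg_py_alt (operand : String) : String :=
  -- operand.strip().lstrip("%"): lstrip with the single char '%' is exactly dropWhile (· = '%')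
  pvBRest ((PySem.Chars.strip operand.toList).dropWhile (· = '%'))

-- ===== PRECONDITION & SPEC =====
def Spec_normalize_reg_py (operand : String) (out : String) : Prop := out = normalize_reg_py_alt operand
instance (operand : String) (out : String) : Decidable (Spec_normalize_reg_py operand out) := by unfold Spec_normalize_reg_py; infer_instance

-- ===== CLAIM (what is proved, stated in full; the proofs are below) =====
def Claim_equal_normalize_reg_py : Prop := ∀ (operand : String), Dom_normalize_reg_py operand → Spec_normalize_reg_py operand (normalize_reg_py operand)

-- ===== LEMMAS AND PROOFS =====

-- all 68 keys A's finished dict carries, in insertion order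
def pvAllKeys : List (List Char) := [
    ['r', 'a', 'x'], ['e', 'a', 'x'], ['a', 'x'], ['a', 'l'], ['a', 'h'],
    ['r', 'b', 'x'], ['e', 'b', 'x'], ['b', 'x'], ['b', 'l'], ['b', 'h'],
    ['r', 'c', 'x'], ['e', 'c', 'x'], ['c', 'x'], ['c', 'l'], ['c', 'h'],
    ['r', 'd', 'x'], ['e', 'd', 'x'], ['d', 'x'], ['d', 'l'], ['d', 'h'],
    ['r', 's', 'i'], ['e', 's', 'i'], ['s', 'i'], ['s', 'i', 'l'],
    ['r', 'd', 'i'], ['e', 'd', 'i'], ['d', 'i'], ['d', 'i', 'l'],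
    ['r', 'b', 'p'], ['e', 'b', 'p'], ['b', 'p'], ['b', 'p', 'l'],
    ['r', 's', 'p'], ['e', 's', 'p'], ['s', 'p'], ['s', 'p', 'l'],
    ['r', '8'], ['r', '8', 'd'], ['r', '8', 'w'], ['r', '8', 'b'],
    ['r', '9'], ['r', '9', 'd'], ['r', '9', 'w'], ['r', '9', 'b'],
    ['r', '1', '0'], ['r', '1', '0', 'd'], ['r', '1', '0', 'w'], ['r', '1', '0', 'b'],
    ['r', '1', '1'], ['r', '1', '1', 'd'], ['r', '1', '1', 'w'], ['r', '1', '1', 'b'],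
    ['r', '1', '2'], ['r', '1', '2', 'd'], ['r', '1', '2', 'w'], ['r', '1', '2', 'b'],
    ['r', '1', '3'], ['r', '1', '3', 'd'], ['r', '1', '3', 'w'], ['r', '1', '3', 'b'],
    ['r', '1', '4'], ['r', '1', '4', 'd'], ['r', '1', '4', 'w'], ['r', '1', '4', 'b'],
    ['r', '1', '5'], ['r', '1', '5', 'd'], ['r', '1', '5', 'w'], ['r', '1', '5', 'b']
  ]

set_option maxRecDepth 20000 in
theorem pv_keysA : pvAliasesA.keys = pvAllKeys := by decide

-- a lookup with the key itself as default returns the key on a miss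
theorem pv_getD_self_of_not_mem_keys (d : PySem.Dict (List Char) (List Char)) (l : List Char)
    (h : l ∉ d.keys) : d.getD l l = l := by
  refine PySem.Dict.getD_of_not_contains d l ?_
  rw [PySem.Dict.contains_eq_decide_mem_keys]
  simpa using h

set_option maxRecDepth 20000 in
theorem pv_main (l : List Char) : pvARest l = pvBRest l := by
  by_cases hk : l ∈ pvAllKeys
  · fin_cases hk <;> decide
  · -- A misses the dict and returns op; every pattern branch of B also fails, B returns op
    have hA : pvARest l = String.ofList l := by
      unfold pvARest
      rw [pv_getD_self_of_not_mem_keys _ _ (by rw [pv_keysA]; exact hk)]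
    have h1 : ¬ ((l.length : Int) = 2 ∧ PySem.List.pyGetD l 0 ' ' ∈ ['a', 'b', 'c', 'd'] ∧ PySem.List.pyGetD l 1 ' ' ∈ ['x', 'l', 'h']) := by
      rintro ⟨hn, ha, hb⟩
      obtain ⟨a, b, rfl⟩ := List.length_eq_two.mp (by exact_mod_cast hn)
      simp [PySem.List.pyGetD, PySem.List.pyGet?, PySem.List.pyIdx?] at ha hb
      rcases ha with rfl | rfl | rfl | rfl <;> rcases hb with rfl | rfl | rfl <;> exact hk (by decide)
    have h2 : ¬ ((l.length : Int) = 3 ∧ PySem.List.pyGetD l 0 ' ' ∈ ['r', 'e'] ∧ PySem.List.pyGetD l 1 ' ' ∈ ['a', 'b', 'c', 'd'] ∧ PySem.List.pyGetD l 2 ' ' = 'x') := by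
      rintro ⟨hn, ha, hb, hc⟩
      obtain ⟨a, b, c, rfl⟩ := List.length_eq_three.mp (by exact_mod_cast hn)
      simp [PySem.List.pyGetD, PySem.List.pyGet?, PySem.List.pyIdx?] at ha hb hc
      subst hc
      rcases ha with rfl | rfl <;> rcases hb with rfl | rfl | rfl | rfl <;> exact hk (by decide)
    have h3 : pvPair l ∉ [['s', 'i'], ['d', 'i'], ['b', 'p'], ['s', 'p']] := by
      intro hp
      unfold pvPair at hp
      by_cases e2 : (l.length : Int) = 2
      · rw [if_pos e2] at hp
        obtain ⟨a, b, rfl⟩ := List.length_eq_two.mp (by exact_mod_cast e2)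
        simp at hp
        rcases hp with ⟨rfl, rfl⟩ | ⟨rfl, rfl⟩ | ⟨rfl, rfl⟩ | ⟨rfl, rfl⟩ <;> exact hk (by decide)
      · rw [if_neg e2] at hp
        by_cases e3 : (l.length : Int) = 3 ∧ PySem.List.pyGetD l 0 ' ' ∈ ['r', 'e']
        · rw [if_pos e3] at hp
          obtain ⟨a, b, c, rfl⟩ := List.length_eq_three.mp (by exact_mod_cast e3.1)
          have ha := e3.2
          simp [PySem.List.pyGetD, PySem.List.pyGet?, PySem.List.pyIdx?] at ha
          rw [PySem.List.slice_from_one] at hp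
          simp at hp
          rcases ha with rfl | rfl <;>
            rcases hp with ⟨rfl, rfl⟩ | ⟨rfl, rfl⟩ | ⟨rfl, rfl⟩ | ⟨rfl, rfl⟩ <;> exact hk (by decide)
        · rw [if_neg e3] at hp
          by_cases e3l : (l.length : Int) = 3 ∧ PySem.List.pyGetD l 2 ' ' = 'l'
          · rw [if_pos e3l] at hp
            obtain ⟨a, b, c, rfl⟩ := List.length_eq_three.mp (by exact_mod_cast e3l.1)
            have hc := e3l.2
            simp [PySem.List.pyGetD, PySem.List.pyGet?, PySem.List.pyIdx?] at hc
            subst hc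
            rw [show PySem.List.slice [a, b, 'l'] none (some 2) = [a, b] from by
              simpa using PySem.List.slice_to [a, b, 'l'] (b := 2) (by norm_num)] at hp
            simp at hp
            rcases hp with ⟨rfl, rfl⟩ | ⟨rfl, rfl⟩ | ⟨rfl, rfl⟩ | ⟨rfl, rfl⟩ <;> exact hk (by decide)
          · rw [if_neg e3l] at hp
            simp at hp
    have h4 : pvBody l ∉ [['8'], ['9'], ['1', '0'], ['1', '1'], ['1', '2'], ['1', '3'], ['1', '4'], ['1', '5']] := by
      intro hb
      simp only [pvBody] at hb
      by_cases hr : PySem.List.slice l none (some 1) = ['r']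
      · obtain ⟨t, rfl⟩ : ∃ t, l = 'r' :: t := by
          cases l with
          | nil =>
            rw [show PySem.List.slice ([] : List Char) none (some 1) = [] from by
              simpa using PySem.List.slice_to ([] : List Char) (b := 1) (by norm_num)] at hr
            exact absurd hr (by decide)
          | cons a t =>
            rw [show PySem.List.slice (a :: t) none (some 1) = [a] from by
              simpa using PySem.List.slice_to (a :: t) (b := 1) (by norm_num)] at hr
            simp at hr
            exact ⟨t, by rw [hr]⟩
        rw [if_pos hr, PySem.List.slice_from_one, List.tail_cons] at hb
        by_cases hs : PySem.List.slice t (some (-1)) none ∈ [['d'], ['w'], ['b']]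
        · rw [if_pos hs, PySem.List.slice_to_neg_one] at hb
          rw [PySem.List.slice_from_neg_one] at hs
          have ht : t.dropLast ++ t.drop (t.length - 1) = t := by
            rw [List.dropLast_eq_take]; exact List.take_append_drop _ t
          simp at hs hb
          rcases hb with e | e | e | e | e | e | e | e <;> rcases hs with f | f | f <;>
            (apply hk; rw [← ht, e, f]; decide)
        · rw [if_neg hs] at hb
          simp at hb
          rcases hb with rfl | rfl | rfl | rfl | rfl | rfl | rfl | rfl <;> exact hk (by decide)
      · rw [if_neg hr] at hb
        simp [PySem.List.slice_from_neg_one] at hb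
    rw [hA]
    unfold pvBRest
    rw [if_neg h1, if_neg h2, if_neg h3, if_neg h4]

-- ===== VERDICT (by name: the statement is the Claim_ definition above) =====
theorem normalize_reg_py_spec : Claim_equal_normalize_reg_py := by
  intro operand _
  unfold Spec_normalize_reg_py normalize_reg_py normalize_reg_py_alt
  exact pv_main _
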